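-- pv_equiv track=rewrite | github.com/yunjikwak/algorithm | 250719/연속된 숫자 만들기 2/create-consecutive-numbers-2.py | check
-- ===== SOURCE A (Python) =====
-- def check(arr):
--     seq = []
--     for i in range(len(arr)-1):
--         seq.append(arr[i+1] - arr[i])
--     seq.sort()
--     if seq[-1] == 1:
--         return 0
--     elif seq[-1] > 1:
--         for s in seq:
--             if s == 2:
--                 return 1
--         return 2
-- ===== SOURCE B (Python) =====
-- def check(arr):
--     mx = None
--     has2 = False
--     prev = None
--     for x in arr:
--         if prev is not None:
--             d = x - prev
--             if mx is None or d > mx: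
--                 mx = d
--             if d == 2:
--                 has2 = True
--         prev = x
--     if mx is None:
--         return None
--     if mx == 1:
--         return 0
--     if mx > 1:
--         return 1 if has2 else 2
--     return None
-- ===== Notes on version B (the rewrite author's own statement) =====
-- stated objective: faster
-- what changed: Replaces build-diff-list + sort + membership scan with a single linear pass tracking the running maximum difference and whether any difference equals 2; Pre_ excludes arrays with fewer than 2 elements, on which A raises IndexError.
-- outside the precondition, e.g. on check([-1]): A raises IndexError, B returns None
import Mathlib
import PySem

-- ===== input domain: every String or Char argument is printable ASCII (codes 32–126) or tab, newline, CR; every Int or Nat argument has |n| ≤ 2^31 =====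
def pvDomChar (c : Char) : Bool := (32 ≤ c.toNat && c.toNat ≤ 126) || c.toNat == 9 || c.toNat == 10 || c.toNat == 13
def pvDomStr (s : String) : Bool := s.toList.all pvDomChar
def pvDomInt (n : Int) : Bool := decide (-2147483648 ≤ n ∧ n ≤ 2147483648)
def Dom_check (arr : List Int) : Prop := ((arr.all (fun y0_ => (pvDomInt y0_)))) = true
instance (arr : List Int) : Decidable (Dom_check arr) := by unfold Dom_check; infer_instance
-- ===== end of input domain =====

-- B replaces A's build-diff-list + sort + scan with one linear pass (running max diff, seen-a-2 flag);
-- arrays of fewer than 2 elements, where A raises IndexError, are outside Pre_check.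

-- ===== PORT A =====
-- seq = []; for i in range(len(arr)-1): seq.append(arr[i+1]-arr[i]); seq.sort(); ...
def check (arr : List Int) : Option Int :=
  let seq := (PySem.List.pyRange 0 ((arr.length : Int) - 1) 1).foldl
    (fun s i => s ++ [PySem.List.pyGetD arr (i + 1) 0 - PySem.List.pyGetD arr i 0]) []
  let sq := PySem.List.sorted seq (fun x => x) false
  match PySem.List.pyGet? sq (-1) with
  | none => none            -- seq[-1] raises IndexError here; excluded by Pre_check
  | some last =>
    if last = 1 then some 0
    else if last > 1 then
      -- for s in seq: if s == 2: return 1 / return 2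
      match sq.find? (fun s => s == 2) with
      | some _ => some 1
      | none => some 2
    else none               -- Python falls off the end: returns None

-- ===== PORT B =====
-- one loop step of Source B: update (prev, mx, has2) with the next element x
def bStep (st : Option Int × Option Int × Bool) (x : Int) : Option Int × Option Int × Bool :=
  match st.1 with
  | none => (some x, st.2.1, st.2.2)
  | some p =>
    let d := x - p
    (some x,
     some (match st.2.1 with | none => d | some m => if d > m then d else m),
     st.2.2 || decide (d = 2))

def check_alt (arr : List Int) : Option Int :=
  let st := arr.foldl bStep (none, none, false)
  match st.2.1 with
  | none => none
  | some m =>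
    if m = 1 then some 0
    else if m > 1 then (if st.2.2 then some 1 else some 2)
    else none

-- ===== PRECONDITION & SPEC =====
-- A evaluates seq[-1] on the empty diff list when len(arr) < 2 and raises IndexError there.
def Pre_check (arr : List Int) : Prop := 2 ≤ arr.length
instance (arr : List Int) : Decidable (Pre_check arr) := by unfold Pre_check; infer_instance
def pvWitness_check : List Int := [1, 3, 4]

def Spec_check (arr : List Int) (out : Option Int) : Prop := out = check_alt arr
instance (arr : List Int) (out : Option Int) : Decidable (Spec_check arr out) := by unfold Spec_check; infer_instance

-- ===== CLAIM (what is proved, stated in full; the proofs are below) =====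
def Claim_equal_check : Prop := ∀ (arr : List Int), Dom_check arr → Pre_check arr → Spec_check arr (check arr)

-- ===== LEMMAS AND PROOFS =====

-- the list of consecutive differences of p :: l
def diffs : Int → List Int → List Int
  | _, [] => []
  | p, x :: t => (x - p) :: diffs x t

theorem diffs_length (p : Int) (l : List Int) : (diffs p l).length = l.length := by
  induction l generalizing p with
  | nil => rfl
  | cons x t ih => simp [diffs, ih]

theorem diffs_getElem (p : Int) (l : List Int) (k : Nat) (hk : k < l.length) :
    (diffs p l)[k]'(by rw [diffs_length]; exact hk) =
      (p :: l).getD (k + 1) 0 - (p :: l).getD k 0 := by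
  induction l generalizing p k with
  | nil => simp at hk
  | cons x t ih =>
    cases k with
    | zero => simp [diffs]
    | succ k =>
      simp only [diffs]
      rw [List.getElem_cons_succ]
      rw [ih x k (by simpa using hk)]
      simp [List.getD]

-- A's seq-building loop produces exactly the consecutive differences
theorem seq_eq_diffs (a : Int) (l : List Int) :
    (PySem.List.pyRange 0 (((a :: l).length : Int) - 1) 1).foldl
      (fun s i => s ++ [PySem.List.pyGetD (a :: l) (i + 1) 0 - PySem.List.pyGetD (a :: l) i 0]) []
    = diffs a l := by
  rw [PySem.List.foldl_append_singleton_eq_map]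
  apply List.ext_getElem
  · simp [PySem.List.length_pyRange_one, diffs_length]
  · intro k h1 h2
    simp only [List.nil_append, List.length_map] at h1 ⊢
    have hk : k < l.length := by
      simpa [PySem.List.length_pyRange_one] using h1
    rw [List.getElem_map, PySem.List.getElem_pyRange_one]
    rw [diffs_getElem a l k hk]
    have e1 : (0 : Int) + (k : Int) + 1 = ((k + 1 : Nat) : Int) := by push_cast; ring
    have e2 : (0 : Int) + (k : Int) = ((k : Nat) : Int) := by ring
    rw [e1, e2, PySem.List.pyGetD_natCast, PySem.List.pyGetD_natCast]

-- B's single-pass loop: last element, running max of diffs, seen-a-2 flag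
theorem bstep2 (t : List Int) : ∀ (m : Int),
    t.foldl (fun acc d => some (match acc with | none => d | some mm => if d > mm then d else mm)) (some m)
    = some (t.foldl max m) := by
  induction t with
  | nil => intro m; rfl
  | cons d t ih =>
    intro m
    simp only [List.foldl_cons]
    have hmx : (if d > m then d else m) = max m d := by
      rw [Int.max_def]; split_ifs <;> omega
    rw [show (some (match (some m : Option Int) with | none => d | some mm => if d > mm then d else mm) : Option Int) = some (max m d) from by rw [← hmx]]
    exact ih (max m d)

theorem bloop (l : List Int) : ∀ (p : Int) (m : Option Int) (h : Bool),
    l.foldl bStep (some p, m, h)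
    = (some (l.getLastD p),
       (diffs p l).foldl (fun acc d => some (match acc with | none => d | some mm => if d > mm then d else mm)) m,
       h || decide (2 ∈ diffs p l)) := by
  induction l with
  | nil => intro p m h; simp [diffs]
  | cons x t ih =>
    intro p m h
    simp only [List.foldl_cons, bStep]
    rw [ih x]
    simp only [List.getLastD_cons, diffs, List.foldl_cons]
    congr 1
    congr 1
    simp only [List.mem_cons]
    by_cases h2 : (2 : Int) ∈ diffs x t <;> by_cases hd : x - p = 2 <;>
      simp [h2, hd, eq_comm]

-- the last element of a sorted (Pairwise ≤) nonempty list bounds every member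
theorem getLast_sorted_max (xs : List Int) (hne : PySem.List.sorted xs (fun x => x) false ≠ [])
    (y : Int) (hy : y ∈ xs) :
    y ≤ (PySem.List.sorted xs (fun x => x) false).getLast hne := by
  set s := PySem.List.sorted xs (fun x => x) false with hs
  have hy' : y ∈ s := by rw [hs, PySem.List.mem_sorted]; exact hy
  obtain ⟨q, hq, hqe⟩ := List.mem_iff_getElem.mp hy'
  rw [List.getLast_eq_getElem]
  rw [← hqe]
  have := PySem.List.key_sorted_getElem_mono (xs := xs) (key := fun x => x) (p := q) (q := s.length - 1)
    (by omega) (by rw [← hs]; omega)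
  simpa [← hs] using this

-- ===== VERDICT (by name: the statement is the Claim_ definition above) =====
theorem check_spec : Claim_equal_check := by
  intro arr _ hpre
  unfold Spec_check
  match arr, hpre with
  | a :: b :: t, _ =>
    unfold check check_alt
    simp only []
    rw [seq_eq_diffs a (b :: t)]
    rw [show List.foldl bStep ((none : Option Int), (none : Option Int), false) (a :: b :: t)
          = List.foldl bStep (some a, none, false) (b :: t) from by
        simp [List.foldl_cons, bStep]]
    rw [bloop (b :: t) a none false]
    simp only [diffs, List.foldl_cons]
    rw [bstep2]
    -- names
    set ds := diffs b t with hds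
    set seq := (b - a) :: ds with hseq
    set M := ds.foldl max (b - a) with hM
    set s := PySem.List.sorted seq (fun x => x) false with hs
    have hsne : s ≠ [] := by
      rw [hs, Ne, PySem.List.sorted_eq_nil_iff]; simp [hseq]
    -- A's last is the max M
    have hlast : PySem.List.pyGet? s (-1) = some (s.getLast hsne) := by
      rw [PySem.List.pyGet?_neg_one, List.getLast?_eq_some_getLast hsne]
    have hLM : s.getLast hsne = M := by
      apply le_antisymm
      · have hmem : s.getLast hsne ∈ seq :=
          (PySem.List.mem_sorted seq (fun x => x) false _).mp (List.getLast_mem hsne)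
        have hbound : ∀ y ∈ seq, y ≤ M := by
          intro y hy
          rw [hseq] at hy
          rcases List.mem_cons.mp hy with h | h
          · subst h; exact (PySem.List.le_foldl_max ds (b - a)).1
          · exact (PySem.List.le_foldl_max ds (b - a)).2 y h
        exact hbound _ hmem
      · have hmem : M ∈ seq := by
          rw [hseq, List.mem_cons, hM]
          rcases PySem.List.foldl_max_mem ds (b - a) with h | h
          · exact Or.inl h
          · exact Or.inr h
        exact getLast_sorted_max seq hsne M hmem
    rw [hlast, hLM]
    -- membership of 2
    have h2 : ((2 : Int) ∈ s) ↔ ((2 : Int) ∈ seq) := PySem.List.mem_sorted seq (fun x => x) false 2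
    by_cases hm2 : (2 : Int) ∈ ((b - a) :: diffs b t)
    · rcases hf : s.find? (fun x => x == 2) with _ | v
      · exfalso
        rw [List.find?_eq_none] at hf
        exact hf 2 (h2.mpr hm2) (by simp)
      · simp [hm2]
    · rcases hf : s.find? (fun x => x == 2) with _ | v
      · simp [hm2]
      · exfalso
        have hv : v = 2 := by simpa using List.find?_some hf
        exact hm2 (h2.mp (hv ▸ List.mem_of_find?_eq_some hf))
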